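-- pv_equiv track=rewrite | github.com/iastate-zuo/algo-problems | challenges/1999/1774.ClosestDessertCost.py | closestCost
-- ===== SOURCE A (Python) =====
-- from typing import List
-- from functools import lru_cache
--
-- def closestCost(base: List[int], topping: List[int], target: int) -> int:
--   base.sort()
--   topping.sort()
--
--   diff = abs(base[0] - target)
--   amnt = base[0]
--
--   @lru_cache(None)
--   def search(b: int, i: int) -> int:
--     if i >= len(topping) or b > target:
--       return b
--
--     v2 = search(b+2*topping[i], i+1)
--     v1 = search(b+topping[i], i+1)
--     v0 = search(b, i+1)
--
--     d2 = abs(target - v2)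
--     d1 = abs(target - v1)
--     d0 = abs(target - v0)
--
--     if d1 < d0 or (d1 == d0 and v1 < v0):
--       d0, v0 = d1, v1
--
--     if d2 < d0 or (d2 == d0 and v2 < v0):
--       d0, v0 = d2, v2
--
--     return v0
--
--   for b in base:
--     # early break
--     if b > target and (b-target) > diff:
--       break
--
--     val = search(b, 0) if b < target else b
--     d = abs(val - target)
--
--     if d < diff or (d == diff and val < amnt):
--       diff = d
--       amnt = val
--
--   return amnt
-- ===== SOURCE B (Python) =====
-- from typing import List
--
-- def closestCost(base: List[int], topping: List[int], target: int) -> int: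
--     # Iterative reachable-sum-set expansion, shared across all bases: start from
--     # every base below target at once, per topping extend each live sum by 0/1/2
--     # copies (sums already above target are frozen, since adding never helps A's
--     # pruned search either), then take the single sum closest to target,
--     # smaller value on ties.
--     active = {b for b in base if b < target}
--     done = {b for b in base if b >= target}
--     for t in sorted(topping):
--         done |= {s for s in active if s > target}
--         active = {s + k * t for s in active if s <= target for k in (0, 1, 2)}
--     return min(active | done, key=lambda v: (abs(v - target), v))
-- ===== Notes on version B (the rewrite author's own statement) =====
-- stated objective: faster
-- what changed: B replaces A's memoized 3-way recursion and its early-break loop over sorted bases by one iterative reachable-sum-set expansion started from all bases at once (sums above target frozen), finished by a single min with key (abs(v-target), v).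
import Mathlib
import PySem

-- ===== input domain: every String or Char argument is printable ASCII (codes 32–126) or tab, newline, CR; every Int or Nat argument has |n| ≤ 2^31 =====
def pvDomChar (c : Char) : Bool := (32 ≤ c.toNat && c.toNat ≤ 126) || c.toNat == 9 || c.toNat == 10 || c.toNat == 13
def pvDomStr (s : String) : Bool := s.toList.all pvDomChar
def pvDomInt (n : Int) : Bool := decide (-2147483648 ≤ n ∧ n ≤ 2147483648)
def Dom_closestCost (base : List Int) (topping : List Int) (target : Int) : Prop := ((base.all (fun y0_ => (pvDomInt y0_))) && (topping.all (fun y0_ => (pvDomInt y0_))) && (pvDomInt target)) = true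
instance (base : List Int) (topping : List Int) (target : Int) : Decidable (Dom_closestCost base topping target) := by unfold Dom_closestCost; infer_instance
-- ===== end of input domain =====

-- B replaces A's memoized 3-way recursion and early-break base loop by one iterative
-- reachable-sum-set expansion shared across all bases, then a single min (objective:
-- faster). A sorts base/topping IN PLACE; B does not mutate its arguments — the
-- equivalence proved here is about the return value only.

-- ===== PORT A =====
-- search(b, i): structural recursion on the remaining toppings (lru_cache is a pure
-- memoisation, semantically transparent; "i >= len(topping) or b > target" becomes
-- the [] case plus the b > target test).
def pvSearchA (target : Int) (b : Int) : List Int → Int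
  | [] => b
  | t :: rest =>
    if b > target then b
    else
      let v2 := pvSearchA target (b + 2*t) rest
      let v1 := pvSearchA target (b + t) rest
      let v0 := pvSearchA target b rest
      let d2 : Int := ((target - v2).natAbs : Int)
      let d1 : Int := ((target - v1).natAbs : Int)
      let d0 : Int := ((target - v0).natAbs : Int)
      -- 'if …: d0, v0 = d1, v1' (tuple assignment, split componentwise)
      let d0' := if d1 < d0 ∨ (d1 = d0 ∧ v1 < v0) then d1 else d0
      let v0' := if d1 < d0 ∨ (d1 = d0 ∧ v1 < v0) then v1 else v0
      if d2 < d0' ∨ (d2 = d0' ∧ v2 < v0') then v2 else v0'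

-- the 'for b in base' loop with its early break, state (diff, amnt)
def pvLoopA (target : Int) (topping : List Int) : List Int → Int → Int → Int
  | [], _, amnt => amnt
  | b :: rest, diff, amnt =>
    if b > target ∧ b - target > diff then amnt
    else
      let val := if b < target then pvSearchA target b topping else b
      let d : Int := ((val - target).natAbs : Int)
      if d < diff ∨ (d = diff ∧ val < amnt) then pvLoopA target topping rest d val
      else pvLoopA target topping rest diff amnt

def closestCost (base : List Int) (topping : List Int) (target : Int) : Int :=
  let sb := PySem.List.sorted base (fun x => x) false
  let st := PySem.List.sorted topping (fun x => x) false
  let b0 := (PySem.List.pyGet? sb 0).getD 0   -- base[0]; Pre_ excludes base = [] (IndexError)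
  let diff : Int := ((b0 - target).natAbs : Int)
  pvLoopA target st sb diff b0

-- ===== PORT B =====
-- strict order of Python's  key=lambda v: (abs(v - target), v)
def pvLtB (target v w : Int) : Bool :=
  (v - target).natAbs < (w - target).natAbs
    || ((v - target).natAbs == (w - target).natAbs && v < w)

-- min(xs, key=key): Python keeps the first extremum; ties in this key force v = w,
-- so the running strict-comparison fold is exact. [] is unreachable (Pre_: base ≠ []).
def pvMinKey (target : Int) : List Int → Int
  | [] => 0
  | x :: xs => xs.foldl (fun m v => if pvLtB target v m then v else m) x

-- one loop iteration: freeze sums above target into done, expand the rest by 0/1/2 copies of t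
def pvStepB (target : Int) (st : PySem.Set Int × PySem.Set Int) (t : Int) :
    PySem.Set Int × PySem.Set Int :=
  let done := PySem.Set.union st.2 (st.1.filter (fun s => decide (s > target)))
  let active := PySem.Set.ofList ((st.1.filter (fun s => decide (s ≤ target))).flatMap
      (fun s => [s + 0*t, s + 1*t, s + 2*t]))
  (active, done)

def closestCost_alt (base : List Int) (topping : List Int) (target : Int) : Int :=
  let active0 := PySem.Set.ofList (base.filter (fun b => decide (b < target)))
  let done0 := PySem.Set.ofList (base.filter (fun b => decide (b ≥ target)))
  let p := (PySem.List.sorted topping (fun x => x) false).foldl (pvStepB target) (active0, done0)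
  pvMinKey target (PySem.Set.union p.1 p.2)

-- ===== PRECONDITION & SPEC =====
-- A evaluates base[0] after sorting: on base = [] it raises IndexError (B's min raises too).
def Pre_closestCost (base : List Int) (topping : List Int) (target : Int) : Prop := base ≠ []
instance (base : List Int) (topping : List Int) (target : Int) : Decidable (Pre_closestCost base topping target) := by unfold Pre_closestCost; infer_instance
def pvWitness_closestCost : List Int × List Int × Int := ([1, 7], [3, 4], 10)
def Spec_closestCost (base : List Int) (topping : List Int) (target : Int) (out : Int) : Prop := out = closestCost_alt base topping target
instance (base : List Int) (topping : List Int) (target : Int) (out : Int) : Decidable (Spec_closestCost base topping target out) := by unfold Spec_closestCost; infer_instance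

-- ===== CLAIM (what is proved, stated in full; the proofs are below) =====
def Claim_equal_closestCost : Prop := ∀ (base : List Int) (topping : List Int) (target : Int), Dom_closestCost base topping target → Pre_closestCost base topping target → Spec_closestCost base topping target (closestCost base topping target)

-- ===== LEMMAS AND PROOFS =====


-- ---- order facts ----
theorem pvLtB_iff (t v w : Int) : pvLtB t v w = true ↔
    ((v - t).natAbs < (w - t).natAbs ∨ ((v - t).natAbs = (w - t).natAbs ∧ v < w)) := by
  simp [pvLtB]

theorem pvLt_irrefl (t v : Int) : pvLtB t v v = false := by
  rw [Bool.eq_false_iff, Ne, pvLtB_iff]; omega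

theorem pvLt_asymm (t v w : Int) (h : pvLtB t v w = true) : pvLtB t w v = false := by
  rw [pvLtB_iff] at h; rw [Bool.eq_false_iff, Ne, pvLtB_iff]; omega

theorem pvLt_total (t v w : Int) (h1 : pvLtB t v w = false) (h2 : pvLtB t w v = false) : v = w := by
  rw [Bool.eq_false_iff, Ne, pvLtB_iff] at h1 h2; omega

theorem pvLe_trans (t a b c : Int) (h1 : pvLtB t b a = false) (h2 : pvLtB t c b = false) :
    pvLtB t c a = false := by
  rw [Bool.eq_false_iff, Ne, pvLtB_iff] at *; omega

def pvIsLeast (t : Int) (l : List Int) (v : Int) : Prop :=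
  v ∈ l ∧ ∀ w ∈ l, pvLtB t w v = false

theorem pvIsLeast_unique {t : Int} {l : List Int} {v w : Int}
    (hv : pvIsLeast t l v) (hw : pvIsLeast t l w) : v = w :=
  pvLt_total t v w (hw.2 v hv.1) (hv.2 w hw.1)

theorem pvMinKey_isLeast (t : Int) (l : List Int) (h : l ≠ []) :
    pvIsLeast t l (pvMinKey t l) := by
  cases l with
  | nil => exact absurd rfl h
  | cons x xs =>
    show pvIsLeast t (x :: xs) (xs.foldl (fun m v => if pvLtB t v m then v else m) x)
    clear h
    induction xs generalizing x with
    | nil =>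
      refine ⟨List.mem_singleton.mpr rfl, ?_⟩
      intro w hw
      rw [List.mem_singleton] at hw
      rw [hw]
      exact pvLt_irrefl t x
    | cons a xs ih =>
      have step : (a :: xs).foldl (fun m v => if pvLtB t v m then v else m) x
          = xs.foldl (fun m v => if pvLtB t v m then v else m) (if pvLtB t a x then a else x) := by
        simp [List.foldl]
      rw [step]
      obtain ⟨hmem, hleast⟩ := ih (if pvLtB t a x then a else x)
      have hy : pvLtB t (if pvLtB t a x then a else x)
          (xs.foldl (fun m v => if pvLtB t v m then v else m) (if pvLtB t a x then a else x)) = false :=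
        hleast _ List.mem_cons_self
      refine ⟨?_, ?_⟩
      · rcases List.mem_cons.mp hmem with h | h
        · rw [h]; split <;> simp
        · simp [List.mem_cons, h]
      · intro w hw
        rcases List.mem_cons.mp hw with h | hw2
        · rw [h]
          refine pvLe_trans t _ (if pvLtB t a x then a else x) _ hy ?_
          by_cases hax : pvLtB t a x = true
          · rw [if_pos hax]; exact pvLt_asymm t a x hax
          · rw [if_neg hax]; exact pvLt_irrefl t x
        · rcases List.mem_cons.mp hw2 with h | hw3
          · rw [h]
            refine pvLe_trans t _ (if pvLtB t a x then a else x) _ hy ?_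
            by_cases hax : pvLtB t a x = true
            · rw [if_pos hax]; exact pvLt_irrefl t a
            · rw [if_neg hax]; rwa [Bool.not_eq_true] at hax
          · exact hleast w (List.mem_cons_of_mem _ hw3)

theorem pvLt_trans (t a b c : Int) (h1 : pvLtB t a b = true) (h2 : pvLtB t b c = true) :
    pvLtB t a c = true := by
  rw [pvLtB_iff] at *; omega

theorem pvLt_le_trans (t a b c : Int) (h1 : pvLtB t a b = true) (h2 : pvLtB t c b = false) :
    pvLtB t c a = false := by
  rw [pvLtB_iff] at h1; rw [Bool.eq_false_iff, Ne, pvLtB_iff] at *; omega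

theorem pvCond_iff (tg v w : Int) :
    ((((tg - v).natAbs : Int) < ((tg - w).natAbs : Int)) ∨
      (((tg - v).natAbs : Int) = ((tg - w).natAbs : Int) ∧ v < w)) ↔ pvLtB tg v w = true := by
  rw [pvLtB_iff]; omega

-- leaves of A's pruned recursion tree
def pvLeafs (tg : Int) : Int → List Int → List Int
  | b, [] => [b]
  | b, t :: rest =>
    if b > tg then [b]
    else pvLeafs tg (b + 2*t) rest ++ pvLeafs tg (b + t) rest ++ pvLeafs tg b rest

theorem self_mem_pvLeafs (tg b : Int) (ts : List Int) : b ∈ pvLeafs tg b ts := by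
  induction ts generalizing b with
  | nil => simp [pvLeafs]
  | cons t rest ih =>
    by_cases h : b > tg
    · simp [pvLeafs, h]
    · simp [pvLeafs, h, List.mem_append, ih b]

theorem pvIsLeast_append3 (tg : Int) (l2 l1 l0 : List Int) (v2 v1 v0 r : Int)
    (h2 : pvIsLeast tg l2 v2) (h1 : pvIsLeast tg l1 v1) (h0 : pvIsLeast tg l0 v0)
    (hr : r = v2 ∨ r = v1 ∨ r = v0)
    (e2 : pvLtB tg v2 r = false) (e1 : pvLtB tg v1 r = false) (e0 : pvLtB tg v0 r = false) :
    pvIsLeast tg (l2 ++ l1 ++ l0) r := by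
  constructor
  · rcases hr with rfl | rfl | rfl
    · simp [List.mem_append, h2.1]
    · simp [List.mem_append, h1.1]
    · simp [List.mem_append, h0.1]
  · intro w hw
    rcases List.mem_append.mp hw with hw' | hw'
    · rcases List.mem_append.mp hw' with hw'' | hw''
      · exact pvLe_trans tg r v2 w e2 (h2.2 w hw'')
      · exact pvLe_trans tg r v1 w e1 (h1.2 w hw'')
    · exact pvLe_trans tg r v0 w e0 (h0.2 w hw')

theorem pvSearchA_isLeast (tg : Int) (ts : List Int) (b : Int) :
    pvIsLeast tg (pvLeafs tg b ts) (pvSearchA tg b ts) := by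
  induction ts generalizing b with
  | nil =>
    refine ⟨by simp [pvSearchA, pvLeafs], ?_⟩
    intro w hw
    simp only [pvLeafs, List.mem_singleton] at hw
    rw [hw, pvSearchA]
    exact pvLt_irrefl tg b
  | cons t rest ih =>
    by_cases hb : b > tg
    · refine ⟨by simp [pvSearchA, pvLeafs, hb], ?_⟩
      intro w hw
      simp only [pvLeafs, if_pos hb, List.mem_singleton] at hw
      rw [hw]
      simp only [pvSearchA, if_pos hb]
      exact pvLt_irrefl tg b
    · have h2 := ih (b + 2*t)
      have h1 := ih (b + t)
      have h0 := ih b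
      simp only [pvSearchA, pvLeafs, if_neg hb]
      by_cases hA : pvLtB tg (pvSearchA tg (b + t) rest) (pvSearchA tg b rest) = true
      · simp only [if_pos ((pvCond_iff tg _ _).mpr hA)]
        by_cases hB : pvLtB tg (pvSearchA tg (b + 2*t) rest) (pvSearchA tg (b + t) rest) = true
        · simp only [if_pos (by exact (pvCond_iff tg _ _).mpr hB)]
          exact pvIsLeast_append3 tg _ _ _ _ _ _ _ h2 h1 h0 (Or.inl rfl)
            (pvLt_irrefl tg _) (pvLt_asymm tg _ _ hB)
            (pvLt_asymm tg _ _ (pvLt_trans tg _ _ _ hB hA))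
        · simp only [if_neg (fun hc => hB ((pvCond_iff tg _ _).mp hc))]
          exact pvIsLeast_append3 tg _ _ _ _ _ _ _ h2 h1 h0 (Or.inr (Or.inl rfl))
            (Bool.not_eq_true _ ▸ hB) (pvLt_irrefl tg _) (pvLt_asymm tg _ _ hA)
      · simp only [if_neg (fun hc => hA ((pvCond_iff tg _ _).mp hc))]
        by_cases hB : pvLtB tg (pvSearchA tg (b + 2*t) rest) (pvSearchA tg b rest) = true
        · simp only [if_pos (by exact (pvCond_iff tg _ _).mpr hB)]
          exact pvIsLeast_append3 tg _ _ _ _ _ _ _ h2 h1 h0 (Or.inl rfl)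
            (pvLt_irrefl tg _)
            (pvLt_le_trans tg _ _ _ hB (Bool.not_eq_true _ ▸ hA))
            (pvLt_asymm tg _ _ hB)
        · simp only [if_neg (fun hc => hB ((pvCond_iff tg _ _).mp hc))]
          exact pvIsLeast_append3 tg _ _ _ _ _ _ _ h2 h1 h0 (Or.inr (Or.inr rfl))
            (Bool.not_eq_true _ ▸ hB) (Bool.not_eq_true _ ▸ hA) (pvLt_irrefl tg _)

theorem pvFold_mem (tg : Int) (ts : List Int) :
    ∀ (A0 D0 : PySem.Set Int) (y : Int),
      (y ∈ PySem.Set.union (ts.foldl (pvStepB tg) (A0, D0)).1 (ts.foldl (pvStepB tg) (A0, D0)).2)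
        ↔ (y ∈ D0 ∨ ∃ b ∈ A0, y ∈ pvLeafs tg b ts) := by
  induction ts with
  | nil =>
    intro A0 D0 y
    simp only [List.foldl_nil, PySem.Set.mem_union, pvLeafs, List.mem_singleton]
    constructor
    · rintro (h | h)
      · exact Or.inr ⟨y, h, rfl⟩
      · exact Or.inl h
    · rintro (h | ⟨b, hb, rfl⟩)
      · exact Or.inr h
      · exact Or.inl hb
  | cons t rest ih =>
    intro A0 D0 y
    rw [List.foldl_cons, ih]
    simp only [pvStepB, PySem.Set.mem_union, PySem.Set.mem_ofList, List.mem_flatMap,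
      List.mem_filter, decide_eq_true_eq]
    constructor
    · rintro (⟨hD | hF⟩ | ⟨b, ⟨s, ⟨hsA, hs⟩, hb⟩, hy⟩)
      · exact Or.inl hD
      · refine Or.inr ⟨y, hF.1, ?_⟩
        simp [pvLeafs, hF.2]
      · refine Or.inr ⟨s, hsA, ?_⟩
        have hns : ¬ s > tg := by omega
        simp only [pvLeafs, if_neg hns, List.mem_append]
        simp only [List.mem_cons, List.not_mem_nil, or_false] at hb
        rcases hb with rfl | rfl | rfl
        · right; exact (by simpa using hy)
        · left; right; exact (by simpa using hy)
        · left; left; exact (by simpa using hy)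
    · rintro (hD | ⟨b, hbA, hy⟩)
      · exact Or.inl (Or.inl hD)
      · by_cases hbt : b > tg
        · simp only [pvLeafs, if_pos hbt, List.mem_singleton] at hy
          subst hy
          exact Or.inl (Or.inr ⟨hbA, hbt⟩)
        · simp only [pvLeafs, if_neg hbt, List.mem_append] at hy
          rcases hy with (h2 | h1) | h0
          · exact Or.inr ⟨b + 2*t, ⟨b, ⟨hbA, by omega⟩, by simp⟩, h2⟩
          · exact Or.inr ⟨b + 1*t, ⟨b, ⟨hbA, by omega⟩, by simp⟩, by simpa using h1⟩
          · exact Or.inr ⟨b, ⟨b, ⟨hbA, by omega⟩, by simp⟩, h0⟩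

theorem pvCond2_iff (tg v w : Int) :
    ((((v - tg).natAbs : Int) < ((w - tg).natAbs : Int)) ∨
      (((v - tg).natAbs : Int) = ((w - tg).natAbs : Int) ∧ v < w)) ↔ pvLtB tg v w = true := by
  rw [pvLtB_iff]; omega

theorem pvLt_helper (t a b c : Int) (h1 : pvLtB t b a = false) (h2 : pvLtB t b c = true) :
    pvLtB t c a = false := by
  rw [Bool.eq_false_iff, Ne, pvLtB_iff] at h1 ⊢; rw [pvLtB_iff] at h2; omega

theorem pvMinKey_cons_drop (t w : Int) (l : List Int) (hl : l ≠ [])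
    (hw : pvLtB t w (pvMinKey t l) = false) : pvMinKey t (w :: l) = pvMinKey t l := by
  have h1 := pvMinKey_isLeast t l hl
  have h2 := pvMinKey_isLeast t (w :: l) (List.cons_ne_nil w l)
  refine pvIsLeast_unique h2 ⟨List.mem_cons_of_mem w h1.1, ?_⟩
  intro v hv
  rcases List.mem_cons.mp hv with rfl | hv'
  · exact hw
  · exact h1.2 v hv'

theorem pvMinKey_middle_drop (t a w : Int) (l : List Int)
    (hw : pvLtB t w (pvMinKey t (a :: l)) = false) :
    pvMinKey t (a :: w :: l) = pvMinKey t (a :: l) := by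
  have h1 := pvMinKey_isLeast t (a :: l) (List.cons_ne_nil a l)
  have h2 := pvMinKey_isLeast t (a :: w :: l) (List.cons_ne_nil a (w :: l))
  refine pvIsLeast_unique h2 ⟨?_, ?_⟩
  · rcases List.mem_cons.mp h1.1 with h | h
    · simp [h]
    · simp [List.mem_cons, h]
  · intro v hv
    rcases List.mem_cons.mp hv with rfl | hv'
    · exact h1.2 v List.mem_cons_self
    · rcases List.mem_cons.mp hv' with rfl | hv''
      · exact hw
      · exact h1.2 v (List.mem_cons_of_mem a hv'')

def pvValA (tg : Int) (st : List Int) (b : Int) : Int :=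
  if b < tg then pvSearchA tg b st else b

theorem pvLoopA_eq (tg : Int) (st : List Int) (bs : List Int) (amnt : Int)
    (hs : bs.Pairwise (· ≤ ·)) :
    pvLoopA tg st bs (((amnt - tg).natAbs : Int)) amnt
      = pvMinKey tg (amnt :: bs.map (pvValA tg st)) := by
  induction bs generalizing amnt with
  | nil => simp [pvLoopA, pvMinKey]
  | cons b rest ih =>
    have hble : ∀ x ∈ rest, b ≤ x := fun x hx => List.rel_of_pairwise_cons hs hx
    have hrest : rest.Pairwise (· ≤ ·) := hs.of_cons
    simp only [pvLoopA, List.map_cons]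
    by_cases hbr : b > tg ∧ b - tg > ((amnt - tg).natAbs : Int)
    · rw [if_pos hbr]
      -- every remaining value is strictly farther from target than amnt: amnt is least
      have hleast : pvIsLeast tg (amnt :: pvValA tg st b :: rest.map (pvValA tg st)) amnt := by
        refine ⟨List.mem_cons_self, ?_⟩
        intro w hw
        have hval : ∀ x, b ≤ x → pvLtB tg (pvValA tg st x) amnt = false := by
          intro x hx
          have hxv : pvValA tg st x = x := by
            unfold pvValA; rw [if_neg (by omega)]
          rw [hxv, Bool.eq_false_iff, Ne, pvLtB_iff]
          omega
        rcases List.mem_cons.mp hw with rfl | hw'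
        · exact pvLt_irrefl tg w
        · rcases List.mem_cons.mp hw' with rfl | hw''
          · exact hval b le_rfl
          · obtain ⟨x, hx, rfl⟩ := List.mem_map.mp hw''
            exact hval x (hble x hx)
      exact pvIsLeast_unique hleast (pvMinKey_isLeast tg _ (List.cons_ne_nil _ _))
    · rw [if_neg hbr]
      have hval : (if b < tg then pvSearchA tg b st else b) = pvValA tg st b := rfl
      by_cases hC : pvLtB tg (pvValA tg st b) amnt = true
      · simp only [hval, if_pos ((pvCond2_iff tg _ _).mpr hC)]
        rw [ih (pvValA tg st b) hrest]
        have hl := pvMinKey_isLeast tg (pvValA tg st b :: rest.map (pvValA tg st))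
          (List.cons_ne_nil _ _)
        exact (pvMinKey_cons_drop tg amnt _ (List.cons_ne_nil _ _)
          (pvLt_helper tg _ _ _ (hl.2 _ List.mem_cons_self) hC)).symm
      · simp only [hval, if_neg (fun hc => hC ((pvCond2_iff tg _ _).mp hc))]
        rw [ih amnt hrest]
        rw [pvMinKey_middle_drop]
        have hl := pvMinKey_isLeast tg (amnt :: rest.map (pvValA tg st)) (List.cons_ne_nil _ _)
        exact pvLe_trans tg _ amnt _ (hl.2 amnt List.mem_cons_self)
          (Bool.not_eq_true _ ▸ hC)

-- ===== VERDICT (by name: the statement is the Claim_ definition above) =====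
theorem closestCost_spec : Claim_equal_closestCost := by
  unfold Claim_equal_closestCost
  intro base topping target hdom hpre
  unfold Spec_closestCost closestCost closestCost_alt
  simp only []
  have hperm := PySem.List.sorted_perm (xs := base) (key := fun x => x) (rev := false)
  have hsbne : PySem.List.sorted base (fun x => x) false ≠ [] := by
    intro h
    exact hpre (List.nil_perm.mp (h ▸ hperm))
  obtain ⟨b0, tl, he⟩ := List.exists_cons_of_ne_nil hsbne
  rw [he]
  have hget : (PySem.List.pyGet? (b0 :: tl) 0).getD 0 = b0 := by
    simp [PySem.List.pyGet?, PySem.List.pyIdx?]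
  rw [hget]
  have hpair : (b0 :: tl).Pairwise (· ≤ ·) := by
    have h := PySem.List.sorted_pairwise (xs := base) (key := fun x => x)
    rw [he] at h
    exact h
  rw [pvLoopA_eq target _ (b0 :: tl) b0 hpair]
  have hlne : (b0 :: tl).map (pvValA target (PySem.List.sorted topping (fun x => x) false)) ≠ [] := by
    simp
  have hl := pvMinKey_isLeast target _ hlne
  have h1 : pvLtB target (pvValA target (PySem.List.sorted topping (fun x => x) false) b0)
      (pvMinKey target ((b0 :: tl).map (pvValA target (PySem.List.sorted topping (fun x => x) false)))) = false :=
    hl.2 _ (List.mem_map.mpr ⟨b0, List.mem_cons_self, rfl⟩)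
  have h2 : pvLtB target b0 (pvValA target (PySem.List.sorted topping (fun x => x) false) b0) = false := by
    unfold pvValA
    split
    · exact (pvSearchA_isLeast target _ b0).2 b0 (self_mem_pvLeafs target b0 _)
    · exact pvLt_irrefl target b0
  rw [pvMinKey_cons_drop target b0 _ hlne (pvLe_trans target _ _ _ h1 h2)]
  have hmemsb : ∀ x : Int, x ∈ b0 :: tl ↔ x ∈ base := by
    intro x
    have := PySem.List.mem_sorted (xs := base) (key := fun x => x) (rev := false) (x := x)
    rw [he] at this
    exact this
  set st := PySem.List.sorted topping (fun x => x) false with hst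
  set C := PySem.Set.union
      (st.foldl (pvStepB target)
        (PySem.Set.ofList (base.filter (fun b => decide (b < target))),
         PySem.Set.ofList (base.filter (fun b => decide (b ≥ target))))).1
      (st.foldl (pvStepB target)
        (PySem.Set.ofList (base.filter (fun b => decide (b < target))),
         PySem.Set.ofList (base.filter (fun b => decide (b ≥ target))))).2 with hC
  have hcand : ∀ y : Int,
      y ∈ C ↔ ((∃ b ∈ base, b ≥ target ∧ y = b) ∨
            ∃ b ∈ base, b < target ∧ y ∈ pvLeafs target b st) := by
    intro y
    rw [hC, pvFold_mem]
    simp only [PySem.Set.mem_ofList, List.mem_filter, decide_eq_true_eq]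
    constructor
    · rintro (⟨hb, hge⟩ | ⟨b, ⟨hb, hlt⟩, hy⟩)
      · exact Or.inl ⟨y, hb, hge, rfl⟩
      · exact Or.inr ⟨b, hb, hlt, hy⟩
    · rintro (⟨b, hb, hge, rfl⟩ | ⟨b, hb, hlt, hy⟩)
      · exact Or.inl ⟨hb, hge⟩
      · exact Or.inr ⟨b, ⟨hb, hlt⟩, hy⟩
  set L := (b0 :: tl).map (pvValA target st) with hL
  have hm := pvMinKey_isLeast target L hlne
  -- the least of the per-base minima is the least of the union of all leaf lists
  have hmem : pvMinKey target L ∈ C := by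
    obtain ⟨x, hx, hvx⟩ := List.mem_map.mp hm.1
    rw [hcand]
    by_cases hxt : x < target
    · refine Or.inr ⟨x, (hmemsb x).mp hx, hxt, ?_⟩
      rw [← hvx]
      show pvValA target st x ∈ _
      unfold pvValA
      rw [if_pos hxt]
      exact (pvSearchA_isLeast target st x).1
    · refine Or.inl ⟨x, (hmemsb x).mp hx, by omega, ?_⟩
      rw [← hvx]
      show pvValA target st x = x
      unfold pvValA
      rw [if_neg hxt]
  refine pvIsLeast_unique ⟨hmem, ?_⟩
    (pvMinKey_isLeast target _ (List.ne_nil_of_mem hmem))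
  intro w hw
  rw [hcand] at hw
  rcases hw with ⟨b, hb, hge, heq⟩ | ⟨b, hb, hlt, hwl⟩
  · rw [heq]
    have hbv : pvValA target st b = b := by unfold pvValA; rw [if_neg (by omega)]
    refine hm.2 b ?_
    rw [← hbv]
    exact List.mem_map.mpr ⟨b, (hmemsb b).mpr hb, rfl⟩
  · have h1 : pvLtB target (pvValA target st b) (pvMinKey target L) = false :=
      hm.2 _ (List.mem_map.mpr ⟨b, (hmemsb b).mpr hb, rfl⟩)
    have h2 : pvLtB target w (pvValA target st b) = false := by
      have := (pvSearchA_isLeast target st b).2 w hwl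
      unfold pvValA
      rwa [if_pos hlt]
    exact pvLe_trans target _ _ _ h1 h2
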